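-- pv_equiv track=rewrite | github.com/DAcosta322/ProjectChinchilla | analyze/ROUND_4/analyze_bot_pairs.py | mid_at
-- ===== SOURCE A (Python) =====
-- def mid_at(mids_p, ts):
--     """Return mid at the latest timestamp <= ts."""
--     if ts in mids_p:
--         return mids_p[ts]
--     keys = sorted(mids_p.keys())
--     lo, hi = 0, len(keys) - 1
--     best = None
--     while lo <= hi:
--         m = (lo + hi) // 2
--         if keys[m] <= ts:
--             best = keys[m]; lo = m + 1
--         else:
--             hi = m - 1
--     return mids_p[best] if best is not None else None
-- ===== SOURCE B (Python) =====
-- def mid_at(mids_p, ts):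
--     """Return mid at the latest timestamp <= ts (single linear pass, no sort)."""
--     best_key = None
--     best_val = None
--     for k, v in mids_p.items():
--         if k <= ts and (best_key is None or k > best_key):
--             best_key = k
--             best_val = v
--     return best_val
-- ===== Notes on version B (the rewrite author's own statement) =====
-- stated objective: simpler
-- what changed: Replaces A's membership shortcut plus sort-then-binary-search over the keys with a single linear accumulator pass over the items, tracking the best qualifying key and its value.
import Mathlib
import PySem

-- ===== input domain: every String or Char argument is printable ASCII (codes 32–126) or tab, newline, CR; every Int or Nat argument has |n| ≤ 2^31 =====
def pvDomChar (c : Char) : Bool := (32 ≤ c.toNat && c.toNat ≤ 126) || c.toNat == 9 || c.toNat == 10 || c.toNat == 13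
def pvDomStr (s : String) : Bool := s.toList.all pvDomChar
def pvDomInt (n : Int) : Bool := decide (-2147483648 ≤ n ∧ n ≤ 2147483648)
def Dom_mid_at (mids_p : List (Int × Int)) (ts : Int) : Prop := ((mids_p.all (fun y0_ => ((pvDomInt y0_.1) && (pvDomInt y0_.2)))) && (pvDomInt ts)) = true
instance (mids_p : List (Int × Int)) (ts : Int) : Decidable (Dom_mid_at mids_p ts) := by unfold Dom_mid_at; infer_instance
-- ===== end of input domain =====

-- B replaces A's membership shortcut plus sort-and-binary-search with one linear
-- accumulator pass over the items (objective: simpler).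

-- ===== PORT A =====
-- the `while lo <= hi` binary-search loop of A; keys[m] via pyGet? (negative wraps,
-- out of range = IndexError → none; never reached from A's initial lo/hi)
-- fuel makes the recursion structural; fuel = interval length + 1 is never exhausted
def midAtLoop (ks : List Int) (ts : Int) (fuel : Nat) (lo hi : Int) (best : Option Int) : Option Int :=
  match fuel with
  | 0 => best
  | fuel + 1 =>
    if lo ≤ hi then
      let m := PySem.Int.floordiv (lo + hi) 2
      match PySem.List.pyGet? ks m with
      | none => none
      | some k =>
        if k ≤ ts then midAtLoop ks ts fuel (m + 1) hi (some k)
        else midAtLoop ks ts fuel lo (m - 1) best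
    else best

def mid_at (mids_p : List (Int × Int)) (ts : Int) : Option Int :=
  let d := PySem.Dict.mk mids_p
  if d.contains ts then d.get? ts
  else
    let keys := PySem.List.sorted d.keys (fun x => x) false
    match midAtLoop keys ts (keys.length + 1) 0 (keys.length - 1) none with
    | some b => d.get? b
    | none => none

-- ===== PORT B =====
-- one pass over the items with accumulator (best_key, best_val)
def midAtStep (ts : Int) (st : Option Int × Option Int) (kv : Int × Int) : Option Int × Option Int :=
  if kv.1 ≤ ts then
    match st.1 with
    | none => (some kv.1, some kv.2)
    | some bk => if bk < kv.1 then (some kv.1, some kv.2) else st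
  else st

def mid_at_alt (mids_p : List (Int × Int)) (ts : Int) : Option Int :=
  (mids_p.foldl (midAtStep ts) (none, none)).2

-- ===== PRECONDITION & SPEC =====
def Spec_mid_at (mids_p : List (Int × Int)) (ts : Int) (out : Option Int) : Prop := out = mid_at_alt mids_p ts
instance (mids_p : List (Int × Int)) (ts : Int) (out : Option Int) : Decidable (Spec_mid_at mids_p ts out) := by unfold Spec_mid_at; infer_instance

-- ===== CLAIM (what is proved, stated in full; the proofs are below) =====
def Claim_equal_mid_at : Prop := ∀ (mids_p : List (Int × Int)) (ts : Int), Dom_mid_at mids_p ts → Spec_mid_at mids_p ts (mid_at mids_p ts)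

-- ===== LEMMAS AND PROOFS =====

-- proof-side reference: the greatest key ≤ ts of a list of keys (none if no key qualifies)
def qmax (ts : Int) : List Int → Option Int
  | [] => none
  | k :: ks =>
    let q := qmax ts ks
    if k ≤ ts then some (q.elim k (max k ·)) else q

-- first-match lookup on the association list, as a find?
def lk (l : List (Int × Int)) (m : Int) : Option Int :=
  (l.find? (fun p => p.1 == m)).map (·.2)

-- the common specification of both programs: value of the greatest qualifying key
def refSpec (mids_p : List (Int × Int)) (ts : Int) : Option Int :=
  (qmax ts (mids_p.map (·.1))).bind (lk mids_p)

theorem qmax_none_iff {ts : Int} {ks : List Int} : qmax ts ks = none ↔ ∀ k ∈ ks, ¬ k ≤ ts := by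
  induction ks with
  | nil => simp [qmax]
  | cons k ks ih =>
    simp only [qmax]
    split_ifs with hk
    · simp [hk]
    · rw [ih]
      constructor
      · intro h x hx
        rcases List.mem_cons.1 hx with rfl | hx'
        · exact hk
        · exact h x hx'
      · intro h x hx; exact h x (List.mem_cons_of_mem _ hx)

theorem qmax_le {ts : Int} {ks : List Int} {m : Int} (h : qmax ts ks = some m) : m ≤ ts := by
  induction ks generalizing m with
  | nil => simp [qmax] at h
  | cons k ks ih =>
    simp only [qmax] at h
    split_ifs at h with hk
    · cases hq : qmax ts ks with
      | none => simp [hq, Option.elim] at h; omega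
      | some q => have := ih hq; simp [hq, Option.elim] at h; omega
    · exact ih h

theorem qmax_mem {ts : Int} {ks : List Int} {m : Int} (h : qmax ts ks = some m) : m ∈ ks := by
  induction ks generalizing m with
  | nil => simp [qmax] at h
  | cons k ks ih =>
    simp only [qmax] at h
    split_ifs at h with hk
    · cases hq : qmax ts ks with
      | none => simp [hq, Option.elim] at h; simp [h]
      | some q =>
        have := ih hq
        simp [hq, Option.elim] at h
        rcases max_choice k q with hc | hc <;> rw [hc] at h
        · simp [h]
        · subst h; simp [this]
    · simp [ih h]

theorem qmax_ub {ts : Int} {ks : List Int} {m : Int} (h : qmax ts ks = some m) :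
    ∀ k ∈ ks, k ≤ ts → k ≤ m := by
  induction ks generalizing m with
  | nil => simp
  | cons k ks ih =>
    intro x hx hxts
    simp only [qmax] at h
    split_ifs at h with hk
    · cases hq : qmax ts ks with
      | none =>
        simp [hq, Option.elim] at h
        rcases List.mem_cons.1 hx with rfl | hx'
        · omega
        · exact absurd hxts (qmax_none_iff.1 hq x hx')
      | some q =>
        simp [hq, Option.elim] at h
        rcases List.mem_cons.1 hx with rfl | hx'
        · subst h; exact le_max_left _ _
        · subst h; exact le_trans (ih hq x hx' hxts) (le_max_right _ _)
    · rcases List.mem_cons.1 hx with rfl | hx'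
      · omega
      · exact ih h x hx' hxts

theorem qmax_eq_some_of {ts : Int} {ks : List Int} {m : Int} (hm : m ∈ ks) (hle : m ≤ ts)
    (hub : ∀ k ∈ ks, k ≤ ts → k ≤ m) : qmax ts ks = some m := by
  cases hq : qmax ts ks with
  | none => exact absurd hle (qmax_none_iff.1 hq m hm)
  | some q =>
    have h1 := qmax_ub hq m hm hle
    have h2 := hub q (qmax_mem hq) (qmax_le hq)
    simp only [Option.some_inj]
    omega

theorem qmax_perm {ts : Int} {ks ks' : List Int} (h : ks.Perm ks') : qmax ts ks = qmax ts ks' := by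
  cases hq : qmax ts ks' with
  | none =>
    rw [qmax_none_iff] at hq ⊢
    intro k hk; exact hq k (h.mem_iff.1 hk)
  | some q =>
    exact qmax_eq_some_of (h.mem_iff.2 (qmax_mem hq)) (qmax_le hq)
      (fun k hk hkts => qmax_ub hq k (h.mem_iff.1 hk) hkts)

theorem lk_eq_get? (l : List (Int × Int)) (m : Int) : (PySem.Dict.mk l).get? m = lk l m := by
  induction l with
  | nil => simp [lk, PySem.Dict.get?]
  | cons p l ih =>
    rw [show (p :: l) = (p.1, p.2) :: l by simp]
    rw [PySem.Dict.get?_mk_cons]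
    simp only [lk, List.find?_cons]
    split_ifs with h
    · simp [h]
    · simp only [h]
      simpa [lk] using ih

theorem qmax_append_singleton (ts : Int) (ks : List Int) (k : Int) :
    qmax ts (ks ++ [k]) =
      if k ≤ ts then some ((qmax ts ks).elim k (max · k)) else qmax ts ks := by
  induction ks with
  | nil => simp [qmax]
  | cons a ks ih =>
    simp only [List.cons_append, qmax, ih]
    split_ifs with hk ha ha
    · cases hq : qmax ts ks with
      | none => simp [Option.elim, max_comm]
      | some q => simp [Option.elim]
    · simp [Option.elim]
    · rfl
    · rfl

theorem lk_append_of_mem {l : List (Int × Int)} {p : Int × Int} {m : Int}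
    (h : m ∈ l.map (·.1)) : lk (l ++ [p]) m = lk l m := by
  simp only [lk, List.find?_append]
  have : (l.find? (fun q => q.1 == m)).isSome := by
    rcases List.mem_map.1 h with ⟨q, hq, hq1⟩
    exact List.find?_isSome.2 ⟨q, hq, by simp [hq1]⟩
  rcases Option.isSome_iff_exists.1 this with ⟨v, hv⟩
  simp [hv]

theorem lk_append_of_not_mem {l : List (Int × Int)} {p : Int × Int}
    (h : p.1 ∉ l.map (·.1)) : lk (l ++ [p]) p.1 = some p.2 := by
  simp only [lk, List.find?_append]
  have : l.find? (fun q => q.1 == p.1) = none := by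
    rw [List.find?_eq_none]
    intro q hq
    simp only [beq_iff_eq]
    intro hq1
    exact h (List.mem_map.2 ⟨q, hq, hq1⟩)
  simp [this]

theorem foldB (ts : Int) (l : List (Int × Int)) :
    l.foldl (midAtStep ts) (none, none) =
      (qmax ts (l.map (·.1)), (qmax ts (l.map (·.1))).bind (lk l)) := by
  induction l using List.reverseRecOn with
  | nil => simp [qmax]
  | append_singleton l p ih =>
    rw [List.foldl_append, ih]
    simp only [List.foldl_cons, List.foldl_nil, List.map_append, List.map_cons, List.map_nil]
    rw [qmax_append_singleton]
    by_cases hp : p.1 ≤ ts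
    · simp only [hp, if_pos]
      cases hq : qmax ts (l.map (·.1)) with
      | none =>
        have hnm : p.1 ∉ l.map (·.1) := by
          intro hmem
          exact (qmax_none_iff.1 hq p.1 hmem) hp
        simp [midAtStep, hp, Option.elim, lk_append_of_not_mem hnm]
      | some q =>
        by_cases hlt : q < p.1
        · have hnm : p.1 ∉ l.map (·.1) := by
            intro hmem
            have := qmax_ub hq p.1 hmem hp
            omega
          simp [midAtStep, hp, hlt, Option.elim, max_eq_right (le_of_lt hlt),
            lk_append_of_not_mem hnm]
        · have hm : q ∈ l.map (·.1) := qmax_mem hq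
          have hmax : max q p.1 = q := max_eq_left (by omega)
          simp [midAtStep, hp, hlt, Option.elim, hmax, lk_append_of_mem hm]
    · simp only [hp, if_neg, not_false_iff]
      cases hq : qmax ts (l.map (·.1)) with
      | none => simp [midAtStep, hp]
      | some q =>
        have hm : q ∈ l.map (·.1) := qmax_mem hq
        simp [midAtStep, hp, lk_append_of_mem hm]

theorem alt_eq_refSpec (mids_p : List (Int × Int)) (ts : Int) :
    mid_at_alt mids_p ts = refSpec mids_p ts := by
  unfold mid_at_alt refSpec
  rw [foldB]

theorem midAtLoop_inv (ks : List Int) (ts : Int) (hs : ks.Pairwise (fun a b => a ≤ b)) :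
    ∀ (fuel : Nat) (lo hi : Int) (best : Option Int),
      (hi + 1 - lo).toNat < fuel →
      0 ≤ lo → hi < (ks.length : Int) →
      (∀ i : Nat, i < ks.length → hi < (i : Int) → ts < ks[i]!) →
      (best = none → lo = 0) →
      (∀ b, best = some b →
        ∃ j : Nat, j < ks.length ∧ (j : Int) = lo - 1 ∧ ks[j]! = b ∧ b ≤ ts) →
      midAtLoop ks ts fuel lo hi best = qmax ts ks := by
  intro fuel
  induction fuel with
  | zero => intro lo hi best hn; omega
  | succ fuel ih =>
    intro lo hi best hn h0 hlen hup hb0 hbs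
    rw [midAtLoop]
    by_cases hle : lo ≤ hi
    · simp only [hle, if_pos]
      have hm := PySem.Int.floordiv_two_mid_bounds hle
      set m := PySem.Int.floordiv (lo + hi) 2 with hmdef
      have h0m : 0 ≤ m := by omega
      have hmlen : m.toNat < ks.length := by omega
      have hget : PySem.List.pyGet? ks m = some ks[m.toNat]! := by
        conv_lhs => rw [show m = ((m.toNat : Nat) : Int) by omega]
        rw [PySem.List.pyGet?_natCast, List.getElem?_eq_getElem hmlen,
          getElem!_pos ks m.toNat hmlen]
      rw [hget]
      simp only
      by_cases hkts : ks[m.toNat]! ≤ ts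
      · rw [if_pos hkts]
        apply ih (m + 1) hi _ (by omega) (by omega) hlen hup (by simp)
        intro b hb
        refine ⟨m.toNat, hmlen, by omega, ?_, ?_⟩
        · injection hb
        · injection hb with hb'; omega
      · rw [if_neg hkts]
        apply ih lo (m - 1) best (by omega) h0 (by omega) _ hb0 hbs
        intro i hilen hmi
        by_cases him : (i : Int) = m
        · have : i = m.toNat := by omega
          subst this
          omega
        · have hgt : m.toNat < i := by omega
          have := List.pairwise_iff_getElem.1 hs m.toNat i hmlen hilen hgt
          rw [getElem!_pos ks i hilen]
          rw [getElem!_pos ks m.toNat hmlen] at hkts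
          omega
    · simp only [hle, if_neg, not_false_iff]
      cases best with
      | none =>
        have hlo : lo = 0 := hb0 rfl
        symm
        rw [qmax_none_iff]
        intro k hk
        rcases List.mem_iff_getElem.1 hk with ⟨i, hi, rfl⟩
        have := hup i hi (by omega)
        rw [getElem!_pos ks i hi] at this
        omega
      | some b =>
        rcases hbs b rfl with ⟨j, hj, hjlo, hjb, hbts⟩
        have hmem : b ∈ ks := by
          rw [← hjb, getElem!_pos ks j hj]; exact List.getElem_mem hj
        have hub : ∀ k ∈ ks, k ≤ ts → k ≤ b := by
          intro k hk hkts
          rcases List.mem_iff_getElem.1 hk with ⟨i, hi, rfl⟩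
          by_cases hil : (i : Int) ≤ lo - 1
          · rcases Nat.lt_or_ge i j with hij | hij
            · have := List.pairwise_iff_getElem.1 hs i j hi hj hij
              rw [← hjb, getElem!_pos ks j hj]
              omega
            · have : i = j := by omega
              subst this
              rw [← hjb, getElem!_pos ks i hi]
          · exfalso
            have := hup i hi (by omega)
            rw [getElem!_pos ks i hi] at this
            omega
        exact (qmax_eq_some_of hmem hbts hub).symm

theorem a_eq_refSpec (mids_p : List (Int × Int)) (ts : Int) :
    mid_at mids_p ts = refSpec mids_p ts := by
  unfold mid_at refSpec
  simp only [PySem.Dict.keys_mk]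
  by_cases hc : (PySem.Dict.mk mids_p).contains ts
  · have hmem : ts ∈ mids_p.map (·.1) := by
      have := (PySem.Dict.contains_iff_mem_keys (PySem.Dict.mk mids_p) ts).1 hc
      simpa [PySem.Dict.keys_mk] using this
    have hq : qmax ts (mids_p.map (·.1)) = some ts :=
      qmax_eq_some_of hmem le_rfl (fun k _ hk => hk)
    simp [hc, hq, lk_eq_get?]
  · have hpair : (PySem.List.sorted (mids_p.map (·.1)) (fun x => x) false).Pairwise
        (fun a b : Int => a ≤ b) := PySem.List.sorted_pairwise _ _
    have hperm := PySem.List.sorted_perm (mids_p.map (·.1)) (fun x : Int => x) false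
    have hloop := midAtLoop_inv _ ts hpair
      ((PySem.List.sorted (mids_p.map (·.1)) (fun x => x) false).length + 1)
      0 (((PySem.List.sorted (mids_p.map (·.1)) (fun x => x) false).length : Int) - 1) none
      (by omega) (le_refl 0) (by omega) (by intro i hi hlt; omega) (fun _ => rfl) (by simp)
    rw [qmax_perm hperm] at hloop
    simp only [hc, if_neg, Bool.false_eq_true, not_false_iff]
    rw [hloop]
    cases hq : qmax ts (mids_p.map (·.1)) with
    | none => simp
    | some b => simp [lk_eq_get?]

-- ===== VERDICT (by name: the statement is the Claim_ definition above) =====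
theorem mid_at_spec : Claim_equal_mid_at := by
  intro mids_p ts _
  unfold Spec_mid_at
  rw [a_eq_refSpec, alt_eq_refSpec]
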